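-- pv_equiv track=rewrite | github.com/kunal-iitj/ICS-ASSIGNMENTS | Assignment 5- Matrix/question2.py | i_am_a_genius
-- ===== SOURCE A (Python) =====
-- def power_set(mylist):
--     if len(mylist) == 0:
--         return [[]]
--     subset = power_set(mylist[1:])
--     return subset + [[mylist[0]] + element for element in subset]
--
-- def i_am_a_genius(mylist):
--     final_list = []
--     new_list = []
--     for element in power_set(mylist):
--         if ("a" in element) and ("b" in element) and ("c" in element):
--             final_list.append(element)
--         else:
--             continue
--     for i in final_list:
--         if i in new_list:
--             continue
--         else:
--             new_list.append(i)
--     return new_list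
-- ===== SOURCE B (Python) =====
-- def i_am_a_genius(mylist):
--     n = len(mylist)
--     out = []
--     for mask in range(2 ** n):
--         subset = [x for i, x in enumerate(mylist) if (mask >> (n - 1 - i)) % 2 == 1]
--         if ("a" in subset) and ("b" in subset) and ("c" in subset) and (subset not in out):
--             out.append(subset)
--     return out
-- ===== Notes on version B (the rewrite author's own statement) =====
-- stated objective: alternative
-- what changed: Replaces the recursive power_set helper by a direct iterative bitmask enumeration of the power set (element 0 as the most significant bit), and fuses A's separate filter pass and dedup pass into the single enumeration loop.
import Mathlib
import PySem

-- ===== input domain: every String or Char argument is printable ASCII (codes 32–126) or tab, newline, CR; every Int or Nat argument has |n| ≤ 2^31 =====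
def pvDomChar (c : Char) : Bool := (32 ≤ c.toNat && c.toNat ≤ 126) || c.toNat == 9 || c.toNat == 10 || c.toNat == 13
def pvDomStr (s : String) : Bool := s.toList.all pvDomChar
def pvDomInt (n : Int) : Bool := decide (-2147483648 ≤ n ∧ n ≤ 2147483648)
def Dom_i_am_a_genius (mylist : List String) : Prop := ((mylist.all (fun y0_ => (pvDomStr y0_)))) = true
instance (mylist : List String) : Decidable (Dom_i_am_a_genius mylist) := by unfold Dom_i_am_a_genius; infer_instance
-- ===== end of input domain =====

-- B replaces the recursive power_set helper by a direct iterative bitmask enumeration of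
-- the power set (element 0 as most significant bit) and fuses the filter and dedup loops
-- into the single enumeration pass; same return value, no mutation.

-- ===== PORT A =====
-- helper power_set: 'if len==0: [[]] else rec on mylist[1:]' = structural match
def power_set : List String → List (List String)
  | [] => [[]]
  | x :: rest =>
    let subset := power_set rest
    subset ++ subset.map (fun element => x :: element)

def i_am_a_genius (mylist : List String) : List (List String) :=
  let final_list := (power_set mylist).foldl
    (fun acc element =>
      if "a" ∈ element ∧ "b" ∈ element ∧ "c" ∈ element then acc ++ [element] else acc) []
  final_list.foldl (fun nl i => if i ∈ nl then nl else nl ++ [i]) []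

-- ===== PORT B =====
-- the comprehension's condition '(mask >> (n - 1 - i)) % 2 == 1'
def pvBit (n mask i : Int) : Bool :=
  PySem.Int.mod (mask >>> (n - 1 - i).toNat) 2 == 1

-- '[x for i, x in enumerate(mylist) if (mask >> (n - 1 - i)) % 2 == 1]'
def pvSubsetOf (n : Int) (mylist : List String) (mask : Int) : List String :=
  ((PySem.List.enumerate mylist).filter (fun p => pvBit n mask p.1)).map (fun p => p.2)

def i_am_a_genius_alt (mylist : List String) : List (List String) :=
  (PySem.List.pyRange 0 ((2 : Int) ^ mylist.length) 1).foldl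
    (fun out mask =>
      let subset := pvSubsetOf (mylist.length : Int) mylist mask
      if ("a" ∈ subset ∧ "b" ∈ subset ∧ "c" ∈ subset) ∧ subset ∉ out then out ++ [subset]
      else out) []

-- ===== PRECONDITION & SPEC =====
def Spec_i_am_a_genius (mylist : List String) (out : List (List String)) : Prop := out = i_am_a_genius_alt mylist
instance (mylist : List String) (out : List (List String)) : Decidable (Spec_i_am_a_genius mylist out) := by unfold Spec_i_am_a_genius; infer_instance

-- ===== CLAIM (what is proved, stated in full; the proofs are below) =====
def Claim_equal_i_am_a_genius : Prop := ∀ (mylist : List String), Dom_i_am_a_genius mylist → Spec_i_am_a_genius mylist (i_am_a_genius mylist)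

-- ===== LEMMAS AND PROOFS =====

-- filters over enumerations whose index predicates agree position-by-position are equal
theorem pv_enum_filt_congr (xs : List String) :
    ∀ (s t : Int) (F G : Int → Bool),
      (∀ k : Nat, k < xs.length → F (s + k) = G (t + k)) →
      ((PySem.List.enumerate xs s).filter (fun p => F p.1)).map (fun p => p.2)
        = ((PySem.List.enumerate xs t).filter (fun p => G p.1)).map (fun p => p.2) := by
  induction xs with
  | nil => intro s t F G _; simp [PySem.List.enumerate_nil]
  | cons x xs ih =>
    intro s t F G h
    have h0 : F s = G t := by simpa using h 0 (by simp)
    have hrec := ih (s + 1) (t + 1) F G (by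
      intro k hk
      have := h (k + 1) (by simpa using Nat.succ_lt_succ hk)
      convert this using 2 <;> push_cast <;> ring)
    simp only [PySem.List.enumerate_cons, List.filter_cons]
    rw [h0]
    cases hGt : G t <;> simp [hrec]

theorem pv_bit_low (n e : Nat) (he : e < n) (kk : Nat) :
    ((2 ^ n + kk) / 2 ^ e) % 2 = (kk / 2 ^ e) % 2 := by
  have hsplit : 2 ^ n = 2 ^ e * 2 ^ (n - e) := by
    rw [← pow_add]; congr 1; omega
  have hpos : 0 < 2 ^ e := Nat.pow_pos (by norm_num)
  rw [hsplit, Nat.mul_add_div hpos]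
  have heven : 2 ^ (n - e) = 2 * 2 ^ (n - e - 1) := by
    rw [← pow_succ']; congr 1; omega
  omega

-- the Int-level bit test evaluates to the Nat-level one
theorem pv_bit_cast (k e : Nat) :
    (PySem.Int.mod ((k : Int) >>> e) 2 == 1)
      = decide ((k / 2 ^ e) % 2 = 1) := by
  have h2 : ((2 : Int)) = ((2 : Nat) : Int) := by norm_num
  rw [← Int.natCast_shiftRight, h2, PySem.Int.mod_natCast, Nat.shiftRight_eq_div_pow]
  by_cases h : (k / 2 ^ e) % 2 = 1
  · simp [h]
  · simp [h]
    rw [show ((2 : Int) ^ e) = ((2 ^ e : Nat) : Int) from by push_cast; ring, ← Int.natCast_div]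
    exact_mod_cast (by omega : 2 ∣ k / 2 ^ e)

theorem pv_sub_low (x : String) (xs : List String) (n k : Nat)
    (hn : n = xs.length) (hk : k < 2 ^ n) :
    pvSubsetOf (((n + 1 : Nat)) : Int) (x :: xs) (k : Int)
      = pvSubsetOf (n : Int) xs (k : Int) := by
  unfold pvSubsetOf
  rw [PySem.List.enumerate_cons, List.filter_cons]
  have hb : pvBit (((n + 1 : Nat)) : Int) (k : Int) (0, x).1 = false := by
    unfold pvBit
    have he : (((n + 1 : Nat) : Int) - 1 - (0, x).1).toNat = n := by simp
    rw [he, pv_bit_cast]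
    simp [Nat.div_eq_of_lt hk]
  rw [hb]
  simp only [Bool.false_eq_true, if_false]
  exact pv_enum_filt_congr xs 1 0 _ _ (fun j hj => by
    unfold pvBit
    have he : (((n + 1 : Nat) : Int) - 1 - (1 + (j : Int))).toNat
        = ((n : Int) - 1 - (0 + (j : Int))).toNat := by omega
    rw [he])

theorem pv_sub_high (x : String) (xs : List String) (n k : Nat)
    (hn : n = xs.length) (hk : k < 2 ^ n) :
    pvSubsetOf (((n + 1 : Nat)) : Int) (x :: xs) ((2 ^ n + k : Nat) : Int)
      = x :: pvSubsetOf (n : Int) xs (k : Int) := by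
  unfold pvSubsetOf
  rw [PySem.List.enumerate_cons, List.filter_cons]
  have hb : pvBit (((n + 1 : Nat)) : Int) ((2 ^ n + k : Nat) : Int) (0, x).1 = true := by
    unfold pvBit
    have he : (((n + 1 : Nat) : Int) - 1 - (0, x).1).toNat = n := by simp
    rw [he, pv_bit_cast]
    simp [Nat.div_eq_of_lt hk]
  rw [hb]
  simp only [if_true, List.map_cons]
  congr 1
  exact pv_enum_filt_congr xs 1 0 _ _ (fun j hj => by
    unfold pvBit
    have he1 : (((n + 1 : Nat) : Int) - 1 - (1 + (j : Int))).toNat = n - 1 - j := by omega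
    have he2 : ((n : Int) - 1 - (0 + (j : Int))).toNat = n - 1 - j := by omega
    rw [he1, he2, pv_bit_cast, pv_bit_cast]
    rw [pv_bit_low n (n - 1 - j) (by omega) k])

-- the enumeration lemma: power_set is the bitmask enumeration, MSB = element 0
theorem pv_power_set_eq (mylist : List String) :
    power_set mylist
      = (List.range (2 ^ mylist.length)).map
          (fun k : Nat => pvSubsetOf (mylist.length : Int) mylist (k : Int)) := by
  induction mylist with
  | nil =>
    simp [power_set, pvSubsetOf, PySem.List.enumerate_nil]
  | cons x xs ih =>
    have h2 : 2 ^ (x :: xs).length = 2 ^ xs.length + 2 ^ xs.length := by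
      rw [List.length_cons, pow_succ]; omega
    rw [h2, List.range_add, List.map_append, List.map_map]
    simp only [power_set]
    congr 1
    · rw [ih]
      refine List.map_congr_left (fun k hk => ?_)
      rw [List.mem_range] at hk
      exact (pv_sub_low x xs xs.length k rfl hk).symm
    · rw [ih, List.map_map]
      refine List.map_congr_left (fun k hk => ?_)
      rw [List.mem_range] at hk
      have := pv_sub_high x xs xs.length k rfl hk
      simp only [Function.comp]
      rw [show ((2 ^ xs.length + k : Nat) : Int) = ((2 ^ xs.length : Nat) : Int) + (k : Int) from by push_cast; ring] at this
      rw [← this]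
      congr 1

-- fusing 'filter then dedup' into one pass
theorem pv_fused (P : List String → Prop) [DecidablePred P] :
    ∀ (L acc : List (List String)),
      (L.filter (fun e => decide (P e))).foldl (fun nl i => if i ∈ nl then nl else nl ++ [i]) acc
        = L.foldl (fun out e => if P e ∧ e ∉ out then out ++ [e] else out) acc := by
  intro L
  induction L with
  | nil => intro acc; simp
  | cons e L ih =>
    intro acc
    simp only [List.filter_cons]
    by_cases hP : P e
    · by_cases hm : e ∈ acc <;> simp [hP, hm, ih]
    · simp [hP, ih]

-- ===== VERDICT (by name: the statement is the Claim_ definition above) =====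
theorem i_am_a_genius_spec : Claim_equal_i_am_a_genius := by
  intro mylist _
  unfold Spec_i_am_a_genius i_am_a_genius i_am_a_genius_alt
  rw [PySem.List.foldl_append_ite_eq_filter, List.nil_append, pv_fused, pv_power_set_eq,
    List.foldl_map]
  have hN : PySem.List.pyRange 0 ((2 : Int) ^ mylist.length) 1
      = (List.range (2 ^ mylist.length)).map (fun k : Nat => (k : Int)) := by
    rw [PySem.List.pyRange_one,
      show ((2 : Int) ^ mylist.length - 0) = ((2 ^ mylist.length : Nat) : Int) from by push_cast; ring,
      Int.toNat_natCast]
    exact List.map_congr_left (fun k _ => by simp)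
  rw [hN, List.foldl_map]
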